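-- pv_equiv track=rewrite | github.com/inspirehep/inspire-utils | inspire_utils/name.py | _generate_non_lastnames_variations
-- ===== SOURCE A (Python) =====
-- from itertools import product, chain
--
-- def _generate_non_lastnames_variations(non_lastnames):
--     """Generate variations for all non-lastnames.
--
--     E.g. For 'John Richard', this method generates: [
--         'John', 'J', 'Richard', 'R', 'John Richard', 'John R', 'J Richard', 'J R',
--     ]
--     """
--     if not non_lastnames:
--         return []
--
--     # Generate name transformations in place for all non lastnames. Transformations include:
--     # 1. Drop non last name, 2. use initial, 3. use full non lastname
--     for idx, non_lastname in enumerate(non_lastnames):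
--         non_lastnames[idx] = (u'', non_lastname[0], non_lastname)
--
--     # Generate the cartesian product of the transformed non lastnames and flatten them.
--     return [
--         (u' '.join(var_elem for var_elem in variation if var_elem)).strip()
--         for variation in product(*non_lastnames)
--     ]
-- ===== SOURCE B (Python) =====
-- def _generate_non_lastnames_variations(non_lastnames):
--     """Base-3 odometer enumeration instead of itertools.product: each variation
--     index's base-3 digits select per name among drop / initial / full (digit for
--     the last name is the least significant, so later names vary fastest).
--     Return-value equivalent to A; unlike A it does not mutate non_lastnames."""
--     n = len(non_lastnames)
--     if n == 0:
--         return []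
--     out = []
--     for code in range(3 ** n):
--         parts = []
--         c = code
--         for name in reversed(non_lastnames):
--             d = c % 3
--             c //= 3
--             if d == 1:
--                 parts.append(name[0])
--             elif d == 2:
--                 parts.append(name)
--         parts.reverse()
--         out.append(u' '.join(parts).strip())
--     return out
-- ===== Notes on version B (the rewrite author's own statement) =====
-- stated objective: alternative
-- what changed: Replaces itertools.product over in-place-transformed ('', initial, full) tuples by a base-3 odometer: B enumerates codes 0..3^n-1 and decodes each code's base-3 digits (least significant = last name, so later names vary fastest) into drop/initial/full choices, joining the chosen parts directly; B does not mutate the input list.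
import Mathlib
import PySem

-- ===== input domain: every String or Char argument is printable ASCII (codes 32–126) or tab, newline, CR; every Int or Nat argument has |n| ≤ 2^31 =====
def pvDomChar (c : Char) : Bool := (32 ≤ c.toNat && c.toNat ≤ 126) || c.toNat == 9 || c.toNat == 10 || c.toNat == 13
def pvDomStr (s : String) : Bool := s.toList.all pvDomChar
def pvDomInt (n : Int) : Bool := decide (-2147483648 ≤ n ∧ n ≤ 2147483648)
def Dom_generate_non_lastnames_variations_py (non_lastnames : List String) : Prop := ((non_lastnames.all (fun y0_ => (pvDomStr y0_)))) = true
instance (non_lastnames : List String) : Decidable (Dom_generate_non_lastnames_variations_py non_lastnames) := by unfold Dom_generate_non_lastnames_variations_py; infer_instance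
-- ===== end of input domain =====

-- B replaces itertools.product + join/strip comprehension by a base-3 odometer decoding each
-- code in range(3**n) into drop/initial/full choices (alternative algorithm, same cost).
-- Equivalence is about the RETURN value only: Python A mutates its argument list in place, B does not.


-- ===== PORT A =====
-- non_lastname[0] as a 1-character string; '.getD ""' is only reached outside Pre_ (Python raises IndexError there)
def pvFirst (n : String) : String := ((PySem.Str.pyGet? n 0).map (fun c => String.ofList [c])).getD ""

-- itertools.product(*lists): first list outermost, last varies fastest
def pvProdA : List (List String) → List (List String)
  | [] => [[]]
  | opts :: rest => opts.flatMap (fun x => (pvProdA rest).map (fun v => x :: v))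

def generate_non_lastnames_variations_py (non_lastnames : List String) : List String :=
  if non_lastnames.isEmpty then []
  else
    -- in-place transformation of each name into its tuple ('', first char, full name)
    let ts : List (List String) := non_lastnames.map (fun n => ["", pvFirst n, n])
    (pvProdA ts).map (fun v =>
      PySem.Str.strip (PySem.Str.join " " (v.filter (fun e => decide (e ≠ "")))))

-- ===== PORT B =====
-- the body of B's inner 'for name in reversed(non_lastnames)' loop: state = (c, parts)
def pvStep (st : Int × List String) (name : String) : Int × List String :=
  let d := PySem.Int.mod st.1 3
  let c := PySem.Int.floordiv st.1 3
  if d == 1 then (c, st.2 ++ [pvFirst name])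
  else if d == 2 then (c, st.2 ++ [name])
  else (c, st.2)

def generate_non_lastnames_variations_py_alt (non_lastnames : List String) : List String :=
  let n := non_lastnames.length
  if n == 0 then []
  else
    (PySem.List.pyRange 0 ((3 : Int) ^ n) 1).map (fun code =>
      let st := non_lastnames.reverse.foldl pvStep (code, [])
      PySem.Str.strip (PySem.Str.join " " st.2.reverse))

-- ===== PRECONDITION & SPEC =====
-- Pre_ excludes lists containing the empty string: Python A raises IndexError at non_lastname[0] there (B raises too).
def Pre_generate_non_lastnames_variations_py (non_lastnames : List String) : Prop :=
  "" ∉ non_lastnames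
instance (non_lastnames : List String) : Decidable (Pre_generate_non_lastnames_variations_py non_lastnames) := by unfold Pre_generate_non_lastnames_variations_py; infer_instance
def pvWitness_generate_non_lastnames_variations_py : List String := ["John", "Richard"]

def Spec_generate_non_lastnames_variations_py (non_lastnames : List String) (out : List String) : Prop := out = generate_non_lastnames_variations_py_alt non_lastnames
instance (non_lastnames : List String) (out : List String) : Decidable (Spec_generate_non_lastnames_variations_py non_lastnames out) := by unfold Spec_generate_non_lastnames_variations_py; infer_instance

-- ===== CLAIM (what is proved, stated in full; the proofs are below) =====
def Claim_equal_generate_non_lastnames_variations_py : Prop := ∀ (non_lastnames : List String), Dom_generate_non_lastnames_variations_py non_lastnames → Pre_generate_non_lastnames_variations_py non_lastnames → Spec_generate_non_lastnames_variations_py non_lastnames (generate_non_lastnames_variations_py non_lastnames)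

-- ===== LEMMAS AND PROOFS =====

-- the part contributed by one name for one base-3 digit
def pvOpt (m : String) (d : Int) : List String :=
  if d == 1 then [pvFirst m] else if d == 2 then [m] else []

-- pure recursion computing the parts B's inner fold produces (in processing order)
def pvDec : List String → Int → List String
  | [], _ => []
  | m :: ms, c => pvOpt m (PySem.Int.mod c 3) ++ pvDec ms (PySem.Int.floordiv c 3)

lemma pvStep_eq (st : Int × List String) (m : String) :
    pvStep st m = (PySem.Int.floordiv st.1 3, st.2 ++ pvOpt m (PySem.Int.mod st.1 3)) := by
  unfold pvStep pvOpt
  split_ifs <;> simp_all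

lemma foldl_pvStep (ms : List String) (c : Int) (parts : List String) :
    (ms.foldl pvStep (c, parts)).2 = parts ++ pvDec ms c := by
  induction ms generalizing c parts with
  | nil => simp [pvDec]
  | cons m ms ih =>
    rw [List.foldl_cons, pvStep_eq, ih]
    simp [pvDec]

lemma pvFirst_ne (m : String) (h : m ≠ "") : pvFirst m ≠ "" := by
  unfold pvFirst
  cases hm : m.toList with
  | nil => exact absurd (String.toList_inj.mp (by simp [hm])) h
  | cons a l =>
    simp [PySem.Str.pyGet?, hm]

lemma range_three (N : Nat) :
    List.range (3 * N) = (List.range N).flatMap (fun q => [3 * q, 3 * q + 1, 3 * q + 2]) := by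
  induction N with
  | zero => simp
  | succ N ih =>
    have h1 : 3 * (N + 1) = (3 * N + 1) + 1 + 1 := by omega
    rw [h1, List.range_succ, List.range_succ, List.range_succ, ih, List.range_succ]
    simp

lemma pvProdA_snoc (l : List (List String)) (o : List String) :
    pvProdA (l ++ [o]) = (pvProdA l).flatMap (fun v => o.map (fun x => v ++ [x])) := by
  induction l with
  | nil => simp [pvProdA]; exact Eq.symm List.map_eq_flatMap
  | cons a l ih =>
    rw [List.cons_append]
    show a.flatMap (fun x => (pvProdA (l ++ [o])).map (fun v => x :: v)) = _
    rw [ih]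
    simp [pvProdA, List.flatMap_assoc, List.flatMap_map, List.map_flatMap, List.map_map,
      Function.comp_def]

-- decoding one snoc'd name: the last name owns the least significant base-3 digit
lemma pvDec_snoc (ts : List String) (m : String) (q d : Nat) (hd : d < 3) :
    pvDec (ts ++ [m]).reverse ((3 * q + d : Nat) : Int)
      = pvOpt m d ++ pvDec ts.reverse (q : Int) := by
  rw [show (ts ++ [m]).reverse = m :: ts.reverse by simp]
  show pvOpt m (PySem.Int.mod _ 3) ++ pvDec ts.reverse (PySem.Int.floordiv _ 3)
        = pvOpt m (d : Int) ++ pvDec ts.reverse (q : Int)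
  have h1 := PySem.Int.mod_natCast (3 * q + d) 3
  have h2 := PySem.Int.floordiv_natCast (3 * q + d) 3
  rw [show ((3 : Nat) : Int) = (3 : Int) by norm_num] at h1 h2
  rw [h1, h2, show (3 * q + d) % 3 = d by omega, show (3 * q + d) / 3 = q by omega]

-- transport a flatMap along an equality of mapped lists
lemma pvFlatMap_comp {A B C D : Type} (l1 : List A) (l2 : List B) (f : A → C) (g : B → C)
    (k : C → List D) (h : l1.map f = l2.map g) :
    l1.flatMap (fun a => k (f a)) = l2.flatMap (fun b => k (g b)) := by
  have e1 : (l1.map f).flatMap k = l1.flatMap (fun a => k (f a)) := List.flatMap_map f k l1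
  have e2 : (l2.map g).flatMap k = l2.flatMap (fun b => k (g b)) := List.flatMap_map g k l2
  rw [← e1, ← e2, h]

-- main correspondence: decoding all codes 0..3^n-1 yields exactly the filtered product rows
lemma pvMain (ns : List String) (h : ∀ m ∈ ns, m ≠ "") :
    (List.range (3 ^ ns.length)).map (fun j => (pvDec ns.reverse ((j : Nat) : Int)).reverse)
      = (pvProdA (ns.map (fun n => ["", pvFirst n, n]))).map
          (fun v => v.filter (fun e => decide (e ≠ ""))) := by
  induction ns using List.reverseRecOn with
  | nil => simp [pvDec, pvProdA]
  | append_singleton ts m ih =>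
    have hm : m ≠ "" := h m (by simp)
    have hf : pvFirst m ≠ "" := pvFirst_ne m hm
    have hts : ∀ x ∈ ts, x ≠ "" := fun x hx => h x (by simp [hx])
    have hpow : (3 : Nat) ^ (ts ++ [m]).length = 3 * 3 ^ ts.length := by
      simp [pow_succ]; ring
    rw [hpow, range_three, List.map_flatMap]
    -- per-code triple in terms of the shorter decode
    have hL : (fun q => ([3 * q, 3 * q + 1, 3 * q + 2].map
                (fun j => (pvDec (ts ++ [m]).reverse ((j : Nat) : Int)).reverse)))
        = fun q => [((pvDec ts.reverse ((q : Nat) : Int)).reverse),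
                    ((pvDec ts.reverse ((q : Nat) : Int)).reverse) ++ [pvFirst m],
                    ((pvDec ts.reverse ((q : Nat) : Int)).reverse) ++ [m]] := by
      funext q
      simp only [List.map_cons, List.map_nil]
      rw [show (3 * q : Nat) = (3 * q + 0 : Nat) by omega,
          pvDec_snoc ts m q 0 (by omega), pvDec_snoc ts m q 1 (by omega),
          pvDec_snoc ts m q 2 (by omega)]
      simp [pvOpt]
    rw [hL]
    rw [List.map_append, List.map_cons, List.map_nil, pvProdA_snoc, List.map_flatMap]
    have hR : (fun v => ((["", pvFirst m, m].map (fun x => v ++ [x])).map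
                  (fun u => u.filter (fun e => decide (e ≠ "")))))
        = fun v => [v.filter (fun e => decide (e ≠ "")),
                    v.filter (fun e => decide (e ≠ "")) ++ [pvFirst m],
                    v.filter (fun e => decide (e ≠ "")) ++ [m]] := by
      funext v
      simp [List.filter_append, hf, hm]
    rw [hR]
    exact pvFlatMap_comp _ _ _ _ (fun u => [u, u ++ [pvFirst m], u ++ [m]]) (ih hts)

-- ===== VERDICT (by name: the statement is the Claim_ definition above) =====
theorem generate_non_lastnames_variations_py_spec : Claim_equal_generate_non_lastnames_variations_py := by
  intro ns _ hpre
  unfold Spec_generate_non_lastnames_variations_py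
  unfold generate_non_lastnames_variations_py generate_non_lastnames_variations_py_alt
  by_cases hemp : ns = []
  · subst hemp; rfl
  · have hne : ¬ ns.isEmpty := by simp [hemp]
    have hlen : ¬ (ns.length == 0) = true := by simp [hemp]
    simp only [hne, hlen, Bool.false_eq_true, if_false]
    have h : ∀ m ∈ ns, m ≠ "" := fun m hm e => hpre (e ▸ hm)
    -- B's code list is range(3^n) cast to Int
    have ht : ((3 : Int) ^ ns.length - 0).toNat = 3 ^ ns.length := by
      rw [sub_zero, show (3 : Int) ^ ns.length = ((3 ^ ns.length : Nat) : Int) by push_cast; ring]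
      exact Int.toNat_natCast _
    have hrange : PySem.List.pyRange 0 ((3 : Int) ^ ns.length) 1
        = (List.range (3 ^ ns.length)).map (fun k => ((k : Nat) : Int)) := by
      rw [PySem.List.pyRange_one, ht]
      simp
    have key := congrArg (List.map (fun u => PySem.Str.strip (PySem.Str.join " " u))) (pvMain ns h)
    rw [List.map_map, List.map_map] at key
    simp only [Function.comp_def] at key
    rw [hrange, List.map_map]
    simp only [foldl_pvStep, List.nil_append, Function.comp_def]
    exact key.symm
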